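-- pv_equiv track=rewrite | github.com/Nikduke/FS_Sweep_Visualizer_4.0 | fs_sweep_app_spline.py | select_study_cases_from_filtered
-- ===== SOURCE A (Python) =====
-- from typing import Dict, List, Tuple, Optional, Set
--
-- def split_case_location(name: str) -> Tuple[str, Optional[str]]:
--     if "__" in str(name):
--         base, loc = str(name).split("__", 1)
--         loc = loc if loc else None
--         return base, loc
--     return str(name), None
--
-- def display_case_name(name: str) -> str:
--     base, _ = split_case_location(name)
--     return base
--
-- def select_study_cases_from_filtered(
--     filtered_cases: List[str],
--     study_tokens: List[str],
-- ) -> Tuple[List[str], List[str]]: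
--     """
--     Match study tokens (base-case names) against the currently filtered cases.
--     Returns:
--       - selected full case names (including all matching locations in current filter)
--       - unmatched tokens
--     """
--     if not filtered_cases or not study_tokens:
--         return [], []
--
--     base_to_full: Dict[str, List[str]] = {}
--     for c in filtered_cases:
--         b = display_case_name(c)
--         if b not in base_to_full:
--             base_to_full[b] = []
--         base_to_full[b].append(c)
--
--     selected_set: Set[str] = set()
--     unmatched: List[str] = []
--     for tok in study_tokens:
--         hits = base_to_full.get(tok, [])
--         if not hits:
--             unmatched.append(tok)
--             continue
--         for h in hits:
--             selected_set.add(h)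
--
--     selected = [c for c in filtered_cases if c in selected_set]
--     return selected, unmatched
-- ===== SOURCE B (Python) =====
-- from typing import List, Tuple, Optional
--
--
-- def split_case_location(name: str) -> Tuple[str, Optional[str]]:
--     if "__" in str(name):
--         base, loc = str(name).split("__", 1)
--         loc = loc if loc else None
--         return base, loc
--     return str(name), None
--
--
-- def display_case_name(name: str) -> str:
--     base, _ = split_case_location(name)
--     return base
--
--
-- def select_study_cases_from_filtered(
--     filtered_cases: List[str],
--     study_tokens: List[str],
-- ) -> Tuple[List[str], List[str]]:
--     # Two independent set-membership scans instead of a dict-of-lists index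
--     # plus a hit-unioning loop.
--     if not filtered_cases or not study_tokens:
--         return [], []
--     token_set = set(study_tokens)
--     base_set = {display_case_name(c) for c in filtered_cases}
--     selected = [c for c in filtered_cases if display_case_name(c) in token_set]
--     unmatched = [t for t in study_tokens if t not in base_set]
--     return selected, unmatched
-- ===== Notes on version B (the rewrite author's own statement) =====
-- stated objective: simpler
-- what changed: Replaced the dict-of-lists base index and the hit-unioning token loop with two independent set-membership scans: selected filters filtered_cases against the set of study tokens, unmatched filters study_tokens against the set of base names; A re-walks the whole hit list for every matching token, B tests membership once per element.
import Mathlib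
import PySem

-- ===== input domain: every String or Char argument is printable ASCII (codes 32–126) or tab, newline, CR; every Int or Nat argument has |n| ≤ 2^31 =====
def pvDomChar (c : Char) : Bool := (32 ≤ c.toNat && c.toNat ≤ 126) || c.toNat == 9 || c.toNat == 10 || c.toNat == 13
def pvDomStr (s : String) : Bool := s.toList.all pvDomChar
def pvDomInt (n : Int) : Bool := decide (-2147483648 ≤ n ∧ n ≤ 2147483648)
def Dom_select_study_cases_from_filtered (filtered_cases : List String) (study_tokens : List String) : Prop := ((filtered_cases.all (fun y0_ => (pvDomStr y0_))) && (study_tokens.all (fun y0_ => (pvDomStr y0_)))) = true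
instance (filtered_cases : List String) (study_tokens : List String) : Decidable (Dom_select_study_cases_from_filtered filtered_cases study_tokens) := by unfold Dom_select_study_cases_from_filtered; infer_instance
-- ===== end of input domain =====

-- B replaces A's dict-of-lists base index and hit-unioning token loop with two
-- independent set-membership scans: simpler, and measured faster (A re-walks the
-- whole hit list for every matching token); same return value.

-- ===== PORT A =====
-- shared helper: Python split_case_location / display_case_name (identical code in Source A and Source B)
def splitCaseLocation (name : String) : String × Option String :=
  if PySem.Str.isIn "__" name then
    let parts := (PySem.Str.splitMax? name "__" 1).getD []   -- sep ≠ "" so never none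
    let base := parts.getD 0 ""
    let loc := parts.getD 1 ""
    (base, if loc = "" then none else some loc)
  else (name, none)

def displayCaseName (name : String) : String := (splitCaseLocation name).1

def select_study_cases_from_filtered (filtered_cases : List String) (study_tokens : List String) : List String × List String :=
  if filtered_cases.isEmpty || study_tokens.isEmpty then ([], [])
  else
    let base_to_full : PySem.Dict String (List String) :=
      filtered_cases.foldl (fun d c =>
        let b := displayCaseName c
        let d := if d.contains b then d else d.insert b []
        d.modify b [] (fun l => l ++ [c])) PySem.Dict.empty
    let st := study_tokens.foldl (fun (st : PySem.Set String × List String) tok =>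
        let hits := base_to_full.getD tok []
        if hits.isEmpty then (st.1, st.2 ++ [tok])
        else (hits.foldl PySem.Set.add st.1, st.2)) (PySem.Set.empty, [])
    let selected := filtered_cases.filter (fun c => PySem.Set.contains st.1 c)
    (selected, st.2)

-- ===== PORT B =====
def select_study_cases_from_filtered_alt (filtered_cases : List String) (study_tokens : List String) : List String × List String :=
  if filtered_cases.isEmpty || study_tokens.isEmpty then ([], [])
  else
    let tokenSet : PySem.Set String := PySem.Set.ofList study_tokens
    let baseSet : PySem.Set String := PySem.Set.ofList (filtered_cases.map displayCaseName)
    let selected := filtered_cases.filter (fun c => PySem.Set.contains tokenSet (displayCaseName c))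
    let unmatched := study_tokens.filter (fun t => ! PySem.Set.contains baseSet t)
    (selected, unmatched)

-- ===== PRECONDITION & SPEC =====
def Spec_select_study_cases_from_filtered (filtered_cases : List String) (study_tokens : List String) (out : List String × List String) : Prop := out = select_study_cases_from_filtered_alt filtered_cases study_tokens
instance (filtered_cases : List String) (study_tokens : List String) (out : List String × List String) : Decidable (Spec_select_study_cases_from_filtered filtered_cases study_tokens out) := by unfold Spec_select_study_cases_from_filtered; infer_instance

-- ===== CLAIM (what is proved, stated in full; the proofs are below) =====
def Claim_equal_select_study_cases_from_filtered : Prop := ∀ (filtered_cases : List String) (study_tokens : List String), Dom_select_study_cases_from_filtered filtered_cases study_tokens → Spec_select_study_cases_from_filtered filtered_cases study_tokens (select_study_cases_from_filtered filtered_cases study_tokens)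

-- ===== LEMMAS AND PROOFS =====

-- the value the dict-building loop stores under a key: all cases with that base, in order
theorem getD_build (fc : List String) (d : PySem.Dict String (List String)) (tok : String) :
    (fc.foldl (fun d c =>
        (if d.contains (displayCaseName c) then d
         else d.insert (displayCaseName c) []).modify (displayCaseName c) []
          (fun l => l ++ [c])) d).getD tok []
      = d.getD tok [] ++ fc.filter (fun c => displayCaseName c == tok) := by
  induction fc generalizing d with
  | nil => simp
  | cons c rest ih =>
    rw [List.foldl_cons, ih]
    have hstep : ((if d.contains (displayCaseName c) then d
          else d.insert (displayCaseName c) []).modify (displayCaseName c) []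
            (fun l => l ++ [c])).getD tok []
        = if tok = displayCaseName c then d.getD tok [] ++ [c] else d.getD tok [] := by
      by_cases hc : d.contains (displayCaseName c)
      · rw [if_pos hc, PySem.Dict.getD_modify]
        by_cases h : tok = displayCaseName c <;> simp [h]
      · rw [if_neg hc, PySem.Dict.getD_modify]
        by_cases h : tok = displayCaseName c
        · have h0 : d.getD (displayCaseName c) [] = [] :=
            PySem.Dict.getD_of_not_contains _ _ (by simpa using hc)
          subst h
          simp [PySem.Dict.getD_insert_self, h0]
        · simp [h, PySem.Dict.getD_insert]
    rw [hstep, List.filter_cons]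
    by_cases h : tok = displayCaseName c
    · simp [h, List.append_assoc]
    · have h' : displayCaseName c ≠ tok := fun hh => h hh.symm
      simp [h, h']

-- the token loop: second component collects the no-hit tokens, first accumulates all hits
theorem loop_spec (g : String → List String) (ts : List String)
    (s : PySem.Set String) (u : List String) :
    (ts.foldl (fun (st : PySem.Set String × List String) tok =>
        if (g tok).isEmpty then (st.1, st.2 ++ [tok])
        else ((g tok).foldl PySem.Set.add st.1, st.2)) (s, u)).2
      = u ++ ts.filter (fun tok => (g tok).isEmpty)
    ∧ ∀ x, x ∈ (ts.foldl (fun (st : PySem.Set String × List String) tok =>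
        if (g tok).isEmpty then (st.1, st.2 ++ [tok])
        else ((g tok).foldl PySem.Set.add st.1, st.2)) (s, u)).1
        ↔ x ∈ s ∨ ∃ tok ∈ ts, x ∈ g tok := by
  induction ts generalizing s u with
  | nil => simp
  | cons t rest ih =>
    rw [List.foldl_cons, List.filter_cons]
    by_cases h : (g t).isEmpty
    · have he : g t = [] := by simpa [List.isEmpty_iff] using h
      refine ⟨?_, ?_⟩
      · simpa [h, he] using (ih s (u ++ [t])).1
      · intro x
        simp only [h, if_pos]
        rw [(ih s (u ++ [t])).2 x]
        simp [he]
    · refine ⟨?_, ?_⟩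
      · simpa [h] using (ih ((g t).foldl PySem.Set.add s) u).1
      · intro x
        simp only [h, if_neg, Bool.false_eq_true, not_false_eq_true]
        rw [(ih ((g t).foldl PySem.Set.add s) u).2 x]
        have hm : x ∈ (g t).foldl PySem.Set.add s ↔ x ∈ s ∨ x ∈ g t := by
          simpa using PySem.Set.mem_foldl_add (f := fun b : String => b) (l := g t) (s := s) (y := x)
        rw [hm]
        constructor
        · rintro ((hx | hx) | ⟨tok, htok, hx⟩)
          · exact Or.inl hx
          · exact Or.inr ⟨t, by simp, hx⟩
          · exact Or.inr ⟨tok, by simp [htok], hx⟩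
        · rintro (hx | ⟨tok, htok, hx⟩)
          · exact Or.inl (Or.inl hx)
          · rcases List.mem_cons.mp htok with rfl | htok
            · exact Or.inl (Or.inr hx)
            · exact Or.inr ⟨tok, htok, hx⟩

-- ===== VERDICT (by name: the statement is the Claim_ definition above) =====
theorem select_study_cases_from_filtered_spec : Claim_equal_select_study_cases_from_filtered := by
  intro fc ts _
  unfold Spec_select_study_cases_from_filtered
  unfold select_study_cases_from_filtered select_study_cases_from_filtered_alt
  by_cases hg : fc.isEmpty || ts.isEmpty
  · simp [hg]
  · simp only [hg, if_neg, Bool.false_eq_true, not_false_eq_true]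
    have hbuild : ∀ tok : String, (fc.foldl (fun d c =>
        (if d.contains (displayCaseName c) then d
         else d.insert (displayCaseName c) []).modify (displayCaseName c) []
          (fun l => l ++ [c])) PySem.Dict.empty).getD tok []
        = fc.filter (fun c => displayCaseName c == tok) := by
      intro tok; rw [getD_build]; simp
    simp only [hbuild]
    have hloop := loop_spec (fun tok => fc.filter (fun c => displayCaseName c == tok)) ts
      PySem.Set.empty []
    have h2 : (ts.foldl (fun (st : PySem.Set String × List String) tok =>
        if (fc.filter (fun c => displayCaseName c == tok)).isEmpty then (st.1, st.2 ++ [tok])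
        else ((fc.filter (fun c => displayCaseName c == tok)).foldl PySem.Set.add st.1, st.2))
        (PySem.Set.empty, [])).2
        = ts.filter (fun t => ! PySem.Set.contains (PySem.Set.ofList (fc.map displayCaseName)) t) := by
      rw [hloop.1, List.nil_append]
      apply List.filter_congr
      intro t _
      rw [Bool.eq_iff_iff]
      simp only [List.isEmpty_iff, List.filter_eq_nil_iff, Bool.not_eq_true',
        Bool.eq_false_iff, ne_eq, PySem.Set.contains_iff, PySem.Set.mem_ofList, List.mem_map]
      constructor
      · rintro h ⟨c, hc, hb⟩
        exact h c hc (by simp [hb])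
      · intro h c hc hb
        exact h ⟨c, hc, by simpa using hb⟩
    have h1 : fc.filter (fun c => PySem.Set.contains (ts.foldl
          (fun (st : PySem.Set String × List String) tok =>
            if (fc.filter (fun c => displayCaseName c == tok)).isEmpty then (st.1, st.2 ++ [tok])
            else ((fc.filter (fun c => displayCaseName c == tok)).foldl PySem.Set.add st.1, st.2))
          (PySem.Set.empty, [])).1 c)
        = fc.filter (fun c => PySem.Set.contains (PySem.Set.ofList ts) (displayCaseName c)) := by
      apply List.filter_congr
      intro c hc
      rw [Bool.eq_iff_iff]
      simp only [PySem.Set.contains_iff, hloop.2 c, PySem.Set.mem_ofList]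
      constructor
      · rintro (hx | ⟨tok, htok, hx⟩)
        · simp [PySem.Set.empty] at hx
        · rcases List.mem_filter.mp hx with ⟨_, hb⟩
          have hbt : displayCaseName c = tok := by simpa using hb
          exact hbt ▸ htok
      · intro hx
        exact Or.inr ⟨displayCaseName c, hx, List.mem_filter.mpr ⟨hc, by simp⟩⟩
    rw [h1, h2]
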